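-- pv_equiv track=rewrite | github.com/ddrichman/SE3Diff | bioemu/src/bioemu/observables_ddr.py | _get_aligned_indices
-- ===== SOURCE A (Python) =====
-- def _get_aligned_indices(seq_alignment_1: str, seq_alignment_2: str) -> list[int]:
--     """
--     Compute the indices of the aligned residues in sequence 1 without gaps in the alignment.
--
--     E.g. seq1=ABCDE, seq2=GABDF, then seq_alignment_1='-ABCDE-', seq_alignment_2='GAB-D-F'.
--     The dashes are gaps and not counted when incrementing the index.
--
--     Args:
--         seq_alignment_1: First of the aligned sequences.
--         seq_alignment_2: Second sequence.
--
--     Returns: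
--         List of indices.
--     """
--     aligned_indices = []
--     n = 0
--     for i, s in enumerate(seq_alignment_1):
--         if s != "-":
--             if seq_alignment_2[i] != "-":
--                 aligned_indices.append(n)
--             n += 1
--     return aligned_indices
-- ===== SOURCE B (Python) =====
-- def _get_aligned_indices(seq_alignment_1: str, seq_alignment_2: str) -> list[int]:
--     # prefix[i] = number of non-gap characters in seq_alignment_1[:i]
--     prefix = [0]
--     for c in seq_alignment_1:
--         prefix.append(prefix[-1] + (c != "-"))
--     return [p for (c1, c2), p in zip(zip(seq_alignment_1, seq_alignment_2), prefix)
--             if c1 != "-" and c2 != "-"]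
-- ===== Notes on version B (the rewrite author's own statement) =====
-- stated objective: alternative
-- what changed: Replaces A's single loop that interleaves a running residue counter with positional indexing into seq2 by a precomputed prefix-count table of seq1's non-gap characters followed by one zip/filter pass that reads each emitted index out of that table.
import Mathlib
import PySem

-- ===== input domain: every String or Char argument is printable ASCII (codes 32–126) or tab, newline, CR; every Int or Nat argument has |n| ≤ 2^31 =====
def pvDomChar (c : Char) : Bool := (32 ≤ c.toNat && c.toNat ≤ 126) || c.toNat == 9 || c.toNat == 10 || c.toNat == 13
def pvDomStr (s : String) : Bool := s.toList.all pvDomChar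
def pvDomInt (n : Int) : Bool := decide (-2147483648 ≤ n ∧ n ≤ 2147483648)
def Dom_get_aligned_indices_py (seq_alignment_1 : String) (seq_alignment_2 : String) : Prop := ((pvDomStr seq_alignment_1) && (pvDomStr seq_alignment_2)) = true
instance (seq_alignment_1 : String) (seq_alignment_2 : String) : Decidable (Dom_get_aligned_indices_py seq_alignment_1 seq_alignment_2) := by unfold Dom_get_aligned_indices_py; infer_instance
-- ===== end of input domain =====

-- B replaces A's interleaved running-counter loop by a precomputed prefix-count table of seq1's
-- non-gap characters plus one zip/filter pass reading indices out of that table; same cost.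

-- ===== PORT A =====
-- Loop over enumerate(seq1) with accumulator counter n; seq2[i] ported with pyGet?
-- (the none case = Python IndexError, excluded by Pre_; the port skips there).
def pvALoop (l2 : List Char) : List (Int × Char) → Int → List Int
  | [], _ => []
  | (i, s) :: rest, n =>
    if s ≠ '-' then
      (match PySem.List.pyGet? l2 i with
       | some c => if c ≠ '-' then n :: pvALoop l2 rest (n + 1) else pvALoop l2 rest (n + 1)
       | none => pvALoop l2 rest (n + 1))
    else pvALoop l2 rest n

def get_aligned_indices_py (seq_alignment_1 : String) (seq_alignment_2 : String) : List Int :=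
  pvALoop seq_alignment_2.toList (PySem.List.enumerate seq_alignment_1.toList 0) 0

-- ===== PORT B =====
-- prefix = [0]; for c in seq1: prefix.append(prefix[-1] + (c != '-'))
def pvPrefixStep (acc : List Int) (c : Char) : List Int :=
  acc ++ [PySem.List.pyGetD acc (-1) 0 + (if c ≠ '-' then 1 else 0)]

-- [p for (c1, c2), p in zip(zip(seq1, seq2), prefix) if c1 != '-' and c2 != '-']
def get_aligned_indices_py_alt (seq_alignment_1 : String) (seq_alignment_2 : String) : List Int :=
  let pre := seq_alignment_1.toList.foldl pvPrefixStep [0]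
  (((seq_alignment_1.toList.zip seq_alignment_2.toList).zip pre).filter
      (fun p => p.1.1 != '-' && p.1.2 != '-')).map (fun p => p.2)

-- ===== PRECONDITION & SPEC =====
-- Pre_: exactly the inputs where Python A returns (every non-gap position of seq1 is in range of
-- seq2); elsewhere A raises IndexError.
def Pre_get_aligned_indices_py (seq_alignment_1 : String) (seq_alignment_2 : String) : Prop :=
  ∀ i : Fin seq_alignment_1.toList.length,
    seq_alignment_1.toList[i] ≠ '-' → (i : Nat) < seq_alignment_2.toList.length
instance (seq_alignment_1 : String) (seq_alignment_2 : String) : Decidable (Pre_get_aligned_indices_py seq_alignment_1 seq_alignment_2) := by unfold Pre_get_aligned_indices_py; infer_instance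
def pvWitness_get_aligned_indices_py : String × String := ("-ABCDE-", "GAB-D-F")

def Spec_get_aligned_indices_py (seq_alignment_1 : String) (seq_alignment_2 : String) (out : List Int) : Prop := out = get_aligned_indices_py_alt seq_alignment_1 seq_alignment_2
instance (seq_alignment_1 : String) (seq_alignment_2 : String) (out : List Int) : Decidable (Spec_get_aligned_indices_py seq_alignment_1 seq_alignment_2 out) := by unfold Spec_get_aligned_indices_py; infer_instance

-- ===== CLAIM (what is proved, stated in full; the proofs are below) =====
def Claim_equal_get_aligned_indices_py : Prop := ∀ (seq_alignment_1 : String) (seq_alignment_2 : String), Dom_get_aligned_indices_py seq_alignment_1 seq_alignment_2 → Pre_get_aligned_indices_py seq_alignment_1 seq_alignment_2 → Spec_get_aligned_indices_py seq_alignment_1 seq_alignment_2 (get_aligned_indices_py seq_alignment_1 seq_alignment_2)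

-- ===== LEMMAS AND PROOFS =====

-- Common recursive description: walk seq1, consume seq2 head-by-head (missing = gap), count
-- non-gap characters of seq1 in n, emit n where both are non-gap.
def pvSpec : List Char → List Char → Int → List Int
  | [], _, _ => []
  | c :: r1, l2, n =>
    if c = '-' then pvSpec r1 l2.tail n
    else (if l2.headD '-' ≠ '-' then [n] else []) ++ pvSpec r1 l2.tail (n + 1)

-- The successive prefix-table values starting from running count t.
def pvTable : List Char → Int → List Int
  | [], _ => []
  | c :: r, t =>
    (t + (if c ≠ '-' then 1 else 0)) :: pvTable r (t + (if c ≠ '-' then 1 else 0))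

lemma pvSpec_nil : ∀ (l1 : List Char) (n : Int), pvSpec l1 [] n = [] := by
  intro l1
  induction l1 with
  | nil => intro n; simp [pvSpec]
  | cons c r ih => intro n; by_cases hc : c = '-' <;> simp [pvSpec, hc, ih]

-- Building the prefix table: foldl from acc ++ [t] appends exactly pvTable l t.
lemma pvFold : ∀ (l : List Char) (acc : List Int) (t : Int),
    l.foldl pvPrefixStep (acc ++ [t]) = acc ++ [t] ++ pvTable l t := by
  intro l
  induction l with
  | nil => intro acc t; simp [pvTable]
  | cons c r ih =>
    intro acc t
    rw [List.foldl_cons,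
        show pvPrefixStep (acc ++ [t]) c
            = (acc ++ [t]) ++ [t + (if c ≠ '-' then 1 else 0)] by
          simp [pvPrefixStep, PySem.List.pyGetD_neg_one_append_singleton]]
    rw [ih (acc ++ [t]) (t + (if c ≠ '-' then 1 else 0))]
    simp [pvTable]

-- B's zip/filter/map pass over the table equals the recursive description.
lemma pvBSpec : ∀ (l1 l2 : List Char) (t : Int),
    (((l1.zip l2).zip (t :: pvTable l1 t)).filter
        (fun p => p.1.1 != '-' && p.1.2 != '-')).map (fun p => p.2)
      = pvSpec l1 l2 t := by
  intro l1
  induction l1 with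
  | nil => intro l2 t; simp [pvSpec]
  | cons c r1 ih =>
    intro l2 t
    cases l2 with
    | nil => simp [pvSpec_nil]
    | cons d r2 =>
      rw [show (c :: r1).zip (d :: r2) = (c, d) :: r1.zip r2 from rfl,
          show pvTable (c :: r1) t
              = (t + (if c ≠ '-' then 1 else 0))
                :: pvTable r1 (t + (if c ≠ '-' then 1 else 0)) from rfl,
          List.zip_cons_cons, List.filter_cons]
      by_cases hc : c = '-'
      · simp only [hc]
        simpa [pvSpec] using ih r2 (t + (if ('-' : Char) ≠ '-' then 1 else 0))
      · by_cases hd : d = '-'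
        · simp only [hd]
          have := ih r2 (t + (if c ≠ '-' then 1 else 0))
          simp only [hc, ne_eq, not_false_eq_true, if_pos] at this ⊢
          simpa [pvSpec, hc] using this
        · have := ih r2 (t + (if c ≠ '-' then 1 else 0))
          simp only [hc, ne_eq, not_false_eq_true, if_pos] at this ⊢
          simpa [pvSpec, hc, hd] using this

-- A's loop from position k with counter n equals the recursive description on the drop.
lemma pvASpec : ∀ (l1 l2 : List Char) (k : Nat) (n : Int),
    pvALoop l2 (PySem.List.enumerate l1 (k : Int)) n = pvSpec l1 (l2.drop k) n := by
  intro l1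
  induction l1 with
  | nil => intros; simp [PySem.List.enumerate_nil, pvALoop, pvSpec]
  | cons c rest ih =>
    intro l2 k n
    rw [PySem.List.enumerate_cons,
        show ((k : Int) + 1) = ((k + 1 : Nat) : Int) by push_cast; ring]
    have htail : (l2.drop k).tail = l2.drop (k + 1) := List.tail_drop
    by_cases hc : c = '-'
    · rw [show pvALoop l2 (((k : Int), c) :: PySem.List.enumerate rest ((k + 1 : Nat) : Int)) n
            = pvALoop l2 (PySem.List.enumerate rest ((k + 1 : Nat) : Int)) n by
          simp [pvALoop, hc]]
      rw [ih l2 (k + 1) n]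
      simp [pvSpec, hc, htail]
    · rw [show pvALoop l2 (((k : Int), c) :: PySem.List.enumerate rest ((k + 1 : Nat) : Int)) n
            = match PySem.List.pyGet? l2 (k : Int) with
              | some d => if d ≠ '-'
                  then n :: pvALoop l2 (PySem.List.enumerate rest ((k + 1 : Nat) : Int)) (n + 1)
                  else pvALoop l2 (PySem.List.enumerate rest ((k + 1 : Nat) : Int)) (n + 1)
              | none => pvALoop l2 (PySem.List.enumerate rest ((k + 1 : Nat) : Int)) (n + 1) by
          simp [pvALoop, hc]]
      rw [PySem.List.pyGet?_natCast]
      rcases hg : l2[k]? with _ | d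
      · have hk : l2.length ≤ k := by
          by_contra hlt; rw [List.getElem?_eq_getElem (by omega)] at hg; exact absurd hg (by simp)
        have h1 : l2.drop k = [] := by rw [List.drop_eq_nil_iff]; omega
        have h2 : l2.drop (k + 1) = [] := by rw [List.drop_eq_nil_iff]; omega
        simp only [ih l2 (k + 1) (n + 1), h1, h2]
        simp [pvSpec, hc]
      · dsimp only
        have hk : k < l2.length := by
          by_contra hlt; rw [List.getElem?_eq_none (by omega)] at hg; exact absurd hg (by simp)
        have hd : l2.drop k = d :: l2.drop (k + 1) := by
          rw [List.drop_eq_getElem_cons hk]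
          have := List.getElem?_eq_getElem hk
          rw [hg] at this; injection this with h; rw [h]
        rw [ih l2 (k + 1) (n + 1), ← htail, hd]
        by_cases hdd : d = '-'
        · rw [if_neg (by simp [hdd])]
          simp [pvSpec, hc, hdd]
        · rw [if_pos (by simp [hdd])]
          simp [pvSpec, hc, hdd]

-- ===== VERDICT (by name: the statement is the Claim_ definition above) =====
theorem get_aligned_indices_py_spec : Claim_equal_get_aligned_indices_py := by
  intro s1 s2 _ _
  unfold Spec_get_aligned_indices_py get_aligned_indices_py get_aligned_indices_py_alt
  have hA := pvASpec s1.toList s2.toList 0 0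
  simp only [Nat.cast_zero, List.drop_zero] at hA
  have hP := pvFold s1.toList [] 0
  simp only [List.nil_append] at hP
  rw [hA]
  simp only [hP]
  exact (pvBSpec s1.toList s2.toList 0).symm
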